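-- pv_equiv track=rewrite | github.com/Srinivas11789/SecurityNuggets | captureTheFlag/Miscellaneous/dctf2019/numbers/solve.py | optimalChoice
-- ===== SOURCE A (Python) =====
-- def optimalChoice(available_choice, current_score):
--
--     # Logic 1
--     # * If the choice I make now will make opponent win, i will never choose it
--     # * If the total is less than the choices I can make, I will make the next optimal choice
--
--     # Analysis:
--     # * It is also worth making the opponent with no moves to make
--     # * Or come to zero first
--
--     optimal_choice = None
--
--     # Optimal logic only for when the current score is less than the sum(all choices)
--     if current_score < sum(available_choice):
--
--         # Brainstorm
--         """
--         for choice in range(len(available_choice)):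
--             if available_choice[choice] <= current_score and (current_score-available_choice[choice]) not in available_choice:
--                 for ch2 in available_choice[:choice]:
--                     if ((current_score-available_choice[choice])-ch2) in available_choice and ((current_score-available_choice[choice])-ch2) != 0:
--                         optimal_choice = ch2
--                 if not optimal_choice:
--                     optimal_choice = available_choice[choice]
--             elif choice <= current_score:
--                 optimal_choice = choice
--         """
--
--         # Choose from the choices
--         for choice in range(len(available_choice)):
--             #if available_choice[choice] == current_score:
--             #    optimal_choice = available_choice[choice]
--             #elif available_choice[choice] < current_score:
--             #    for ch2 in available_choice[:choice]:
--
--             # Select a choice which wont make the opponent win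
--             if available_choice[choice] <= current_score and (current_score-available_choice[choice]) not in available_choice:
--                 optimal_choice = available_choice[choice]
--                 # Consider opponents decision and make a better choice
--                 for ch2 in available_choice[:choice]:
--                     if ((current_score-available_choice[choice])-ch2) in available_choice and ((current_score-available_choice[choice])-ch2) != 0:# and ((current_score-available_choice[choice])) not in available_choice:
--                         optimal_choice = ch2
--             elif available_choice[choice] <= current_score:
--                 # Fallback if you cant decide
--                 optimal_choice = available_choice[choice]
--
--         # If the optimal logic does not work go with the minimum
--         if not optimal_choice:
--             if current_score in available_choice:
--                 optimal_choice = current_score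
--             else:
--                 optimal_choice = min(available_choice)
--     else:
--         # If the score is way above control ( sum of choices ), use the max choice to reduce score
--         optimal_choice = max(available_choice)
--     return str(optimal_choice)
-- ===== SOURCE B (Python) =====
-- def optimalChoice(available_choice, current_score):
--     # Only the LAST choice <= score matters: find its index in one pass and do the
--     # opponent-lookahead scan once, backwards with early exit (A redoes it per index).
--     if current_score >= sum(available_choice):
--         return str(max(available_choice))
--     i = -1
--     for j in range(len(available_choice)):
--         if available_choice[j] <= current_score:
--             i = j
--     opt = None
--     if i >= 0:
--         v = available_choice[i]
--         diff = current_score - v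
--         opt = v
--         if diff not in available_choice:
--             for ch2 in reversed(available_choice[:i]):
--                 if (diff - ch2) in available_choice and (diff - ch2) != 0:
--                     opt = ch2
--                     break
--     if not opt:
--         opt = current_score if current_score in available_choice else min(available_choice)
--     return str(opt)
-- ===== Notes on version B (the rewrite author's own statement) =====
-- stated objective: alternative
-- what changed: A folds over every index, redoing the full opponent-lookahead inner scan at each qualifying index and keeping only the last result; B finds the last qualifying index in one pass and then runs that inner scan exactly once, backwards with an early break (same worst-case order on typical inputs, far less work when many indices qualify).
-- outside the precondition, e.g. on optimalChoice([], 5): A raises ValueError, B raises ValueError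
import Mathlib
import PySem

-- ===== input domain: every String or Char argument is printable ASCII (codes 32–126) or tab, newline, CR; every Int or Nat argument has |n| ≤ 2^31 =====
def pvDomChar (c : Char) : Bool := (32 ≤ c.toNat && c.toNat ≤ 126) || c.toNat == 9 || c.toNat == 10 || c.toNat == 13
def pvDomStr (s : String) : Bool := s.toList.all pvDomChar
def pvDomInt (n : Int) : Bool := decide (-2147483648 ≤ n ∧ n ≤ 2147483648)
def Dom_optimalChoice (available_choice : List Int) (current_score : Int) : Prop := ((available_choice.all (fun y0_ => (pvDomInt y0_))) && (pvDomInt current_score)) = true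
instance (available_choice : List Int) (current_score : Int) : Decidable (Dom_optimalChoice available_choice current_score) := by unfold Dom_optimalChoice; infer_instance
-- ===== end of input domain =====

-- B replaces A's full index loop (which redoes the opponent-lookahead scan at every
-- qualifying index, keeping only the last) by one pass that finds the last qualifying
-- index and then runs that scan once, backwards with early exit (objective: alternative).

-- ===== PORT A =====
def optimalChoice (available_choice : List Int) (current_score : Int) : String :=
  if current_score < available_choice.sum then
    let opt : Option Int :=
      (PySem.List.pyRange 0 (PySem.List.len available_choice) 1).foldl
        (fun optimal choice =>
          let v := PySem.List.pyGetD available_choice choice 0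
          if v ≤ current_score ∧ ¬ (current_score - v) ∈ available_choice then
            (PySem.List.slice available_choice none (some choice)).foldl
              (fun o ch2 =>
                if (current_score - v) - ch2 ∈ available_choice ∧ (current_score - v) - ch2 ≠ 0
                then some ch2 else o)
              (some v)
          else if v ≤ current_score then some v
          else optimal)
        none
    -- 'if not optimal_choice' : triggers on None and on 0
    let final : Int :=
      match opt with
      | none => if current_score ∈ available_choice then current_score
                else (PySem.List.min? available_choice (fun x => x)).getD 0
      | some o => if o = 0 then
                    (if current_score ∈ available_choice then current_score
                     else (PySem.List.min? available_choice (fun x => x)).getD 0)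
                  else o
    PySem.Int.toStr final
  else
    PySem.Int.toStr ((PySem.List.max? available_choice (fun x => x)).getD 0)

-- ===== PORT B =====
def optimalChoice_alt (available_choice : List Int) (current_score : Int) : String :=
  if current_score ≥ available_choice.sum then
    PySem.Int.toStr ((PySem.List.max? available_choice (fun x => x)).getD 0)
  else
    let i : Int :=
      (PySem.List.pyRange 0 (PySem.List.len available_choice) 1).foldl
        (fun i j => if PySem.List.pyGetD available_choice j 0 ≤ current_score then j else i)
        (-1)
    let opt : Option Int :=
      if 0 ≤ i then
        let v := PySem.List.pyGetD available_choice i 0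
        let diff := current_score - v
        if diff ∈ available_choice then some v
        else
          -- 'for ch2 in reversed(available_choice[:i]): … break'
          match (PySem.List.slice available_choice none (some i)).reverse.find?
              (fun ch2 => decide (diff - ch2 ∈ available_choice ∧ diff - ch2 ≠ 0)) with
          | some c => some c
          | none => some v
      else none
    -- 'if not opt'
    let final : Int :=
      match opt with
      | none => if current_score ∈ available_choice then current_score
                else (PySem.List.min? available_choice (fun x => x)).getD 0
      | some o => if o = 0 then
                    (if current_score ∈ available_choice then current_score
                     else (PySem.List.min? available_choice (fun x => x)).getD 0)
                  else o
    PySem.Int.toStr final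

-- ===== PRECONDITION & SPEC =====
-- Pre_ excludes only the empty list, on which A raises ValueError (max/min of an empty sequence).
def Pre_optimalChoice (available_choice : List Int) (current_score : Int) : Prop :=
  available_choice ≠ []
instance (available_choice : List Int) (current_score : Int) : Decidable (Pre_optimalChoice available_choice current_score) := by unfold Pre_optimalChoice; infer_instance

def pvWitness_optimalChoice : List Int × Int := ([1, 2, 3], 4)

def Spec_optimalChoice (available_choice : List Int) (current_score : Int) (out : String) : Prop := out = optimalChoice_alt available_choice current_score
instance (available_choice : List Int) (current_score : Int) (out : String) : Decidable (Spec_optimalChoice available_choice current_score out) := by unfold Spec_optimalChoice; infer_instance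

-- ===== CLAIM (what is proved, stated in full; the proofs are below) =====
def Claim_equal_optimalChoice : Prop := ∀ (available_choice : List Int) (current_score : Int), Dom_optimalChoice available_choice current_score → Pre_optimalChoice available_choice current_score → Spec_optimalChoice available_choice current_score (optimalChoice available_choice current_score)

-- ===== LEMMAS AND PROOFS =====

/-- A left fold whose step overwrites the accumulator with `h i` exactly when `q i`
holds (independently of the old accumulator) computes the `h`-value of the LAST
element satisfying `q`, i.e. the first match of the reversed list. -/
lemma foldl_lastdef {α β : Type} (q : α → Bool) (h : α → β) (f : β → α → β)
    (hf : ∀ s i, f s i = if q i then h i else s) :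
    ∀ (l : List α) (init : β),
      l.foldl f init = match l.reverse.find? q with | some i => h i | none => init := by
  intro l
  induction l with
  | nil => intro init; simp
  | cons x t ih =>
    intro init
    simp only [List.foldl_cons, List.reverse_cons, List.find?_append]
    rw [ih]
    cases hfind : t.reverse.find? q with
    | some i => simp
    | none =>
      simp only [Option.none_or]
      rw [hf]
      by_cases hq : q x = true
      · simp [List.find?, hq]
      · simp [List.find?, Bool.of_not_eq_true hq]

-- ===== VERDICT (by name: the statement is the Claim_ definition above) =====
theorem optimalChoice_spec : Claim_equal_optimalChoice := by
  intro ac cs _ _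
  unfold Spec_optimalChoice optimalChoice optimalChoice_alt
  by_cases hlt : cs < ac.sum
  · simp only [hlt, if_pos, ge_iff_le, if_neg (by omega : ¬ ac.sum ≤ cs)]
    -- rewrite A's outer fold
    rw [foldl_lastdef (q := fun c => decide (PySem.List.pyGetD ac c 0 ≤ cs))
        (h := fun c =>
          if ¬ (cs - PySem.List.pyGetD ac c 0) ∈ ac then
            (PySem.List.slice ac none (some c)).foldl
              (fun o ch2 =>
                if (cs - PySem.List.pyGetD ac c 0) - ch2 ∈ ac ∧ (cs - PySem.List.pyGetD ac c 0) - ch2 ≠ 0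
                then some ch2 else o)
              (some (PySem.List.pyGetD ac c 0))
          else some (PySem.List.pyGetD ac c 0))
        (f := _) ?hfA]
    case hfA =>
      intro s c
      by_cases h1 : PySem.List.pyGetD ac c 0 ≤ cs
      · by_cases h2 : (cs - PySem.List.pyGetD ac c 0) ∈ ac <;> simp [h1, h2]
      · simp [h1]
    -- rewrite B's index fold
    rw [foldl_lastdef (q := fun c => decide (PySem.List.pyGetD ac c 0 ≤ cs))
        (h := fun c => c) (f := _) ?hfB]
    case hfB =>
      intro s c
      by_cases h1 : PySem.List.pyGetD ac c 0 ≤ cs <;> simp [h1]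
    cases hfind : (PySem.List.pyRange 0 (PySem.List.len ac) 1).reverse.find?
        (fun c => decide (PySem.List.pyGetD ac c 0 ≤ cs)) with
    | none => simp
    | some c =>
      have hc : 0 ≤ c := by
        have hmem := List.mem_of_find?_eq_some hfind
        rw [List.mem_reverse, PySem.List.mem_pyRange_one] at hmem
        omega
      simp only [hc, if_pos]
      -- rewrite A's inner fold
      rw [foldl_lastdef
          (q := fun ch2 => decide ((cs - PySem.List.pyGetD ac c 0) - ch2 ∈ ac ∧
                                   (cs - PySem.List.pyGetD ac c 0) - ch2 ≠ 0))
          (h := fun ch2 => some ch2) (f := _) ?hfI]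
      case hfI =>
        intro s ch2
        by_cases h1 : (cs - PySem.List.pyGetD ac c 0) - ch2 ∈ ac ∧
            (cs - PySem.List.pyGetD ac c 0) - ch2 ≠ 0 <;> simp [h1]
      by_cases hdiff : (cs - PySem.List.pyGetD ac c 0) ∈ ac
      · simp [hdiff]
      · simp only [hdiff, not_false_eq_true, if_pos]
        cases hf2 : (PySem.List.slice ac none (some c)).reverse.find?
            (fun ch2 => decide ((cs - PySem.List.pyGetD ac c 0) - ch2 ∈ ac ∧
                                (cs - PySem.List.pyGetD ac c 0) - ch2 ≠ 0)) with
        | none => simp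
        | some x => simp
  · simp [hlt, show ac.sum ≤ cs by omega]
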